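-- pv_equiv track=rewrite | github.com/yun73/Pyhton_Algorithm | solving_club/ws/string/16348_palin.py | palin_col
-- ===== SOURCE A (Python) =====
-- def palin_col(word, M, i, j):
--     pal = ''
--     for n in range(M // 2 + 1):
--         if word[j + n][i] != word[j + M - 1 - n][i]:
--             break
--     else:
--         for p in range(M):
--             pal += word[j + p][i]
--         return pal
--     return pal
-- ===== SOURCE B (Python) =====
-- def palin_col(word, M, i, j):
--     lo, hi = j, j + M - 1
--     front, back = [], []
--     while lo < hi:
--         a, b = word[lo][i], word[hi][i]
--         if a != b:
--             return ''
--         front.append(a)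
--         back.append(b)
--         lo += 1
--         hi -= 1
--     if lo == hi:
--         front.append(word[lo][i])
--     back.reverse()
--     return ''.join(front) + ''.join(back)
-- ===== Notes on version B (the rewrite author's own statement) =====
-- stated objective: alternative
-- what changed: B replaces A's two loops (half-range index-pair check with for/else/break, then a separate rebuilding loop re-reading every cell) by a single two-pointer pass that compares the ends and collects the column's front and back halves as it goes, assembling the result without re-reading.
import Mathlib
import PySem

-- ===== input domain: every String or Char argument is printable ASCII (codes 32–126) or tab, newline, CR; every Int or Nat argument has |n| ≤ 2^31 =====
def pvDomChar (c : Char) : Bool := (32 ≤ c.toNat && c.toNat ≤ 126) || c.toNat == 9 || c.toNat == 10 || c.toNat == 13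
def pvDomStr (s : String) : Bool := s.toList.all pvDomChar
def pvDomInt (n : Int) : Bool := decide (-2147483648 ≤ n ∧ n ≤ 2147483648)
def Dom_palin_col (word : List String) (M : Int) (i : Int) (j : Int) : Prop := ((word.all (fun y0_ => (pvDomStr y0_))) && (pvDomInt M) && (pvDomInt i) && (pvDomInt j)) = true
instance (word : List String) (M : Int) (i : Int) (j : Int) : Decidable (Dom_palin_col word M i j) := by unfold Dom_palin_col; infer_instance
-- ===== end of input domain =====

-- B replaces A's two loops (half-range pair check, then a rebuilding loop re-reading every
-- cell) with a single two-pointer pass that checks ends and collects both halves as it goes.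

-- shared read of word[r][i] (none = Python IndexError; used by both ports and by Pre_)
def pvReadC (word : List String) (r : Int) (i : Int) : Option Char :=
  (PySem.List.pyGet? word r).bind (fun s => PySem.Str.pyGet? s i)

-- ===== PORT A =====
-- the for/else with break is ported as: the else-branch (build) runs iff every
-- comparison in range(M//2+1) holds; a failing read (Python IndexError) is outside Pre_
def palin_col (word : List String) (M : Int) (i : Int) (j : Int) : String :=
  if (PySem.List.pyRange 0 (PySem.Int.floordiv M 2 + 1) 1).all
       (fun n => pvReadC word (j + n) i == pvReadC word (j + M - 1 - n) i)
  then (PySem.List.pyRange 0 M 1).foldl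
         (fun pal p => pal ++ (match pvReadC word (j + p) i with
                               | some c => String.ofList [c]
                               | none => ""))
         ""
  else ""

-- ===== PORT B =====
-- the while lo < hi loop of Source B; the Nat argument is pure fuel (always sufficient at the
-- call site, the loop runs at most M times); a failing read (Python IndexError) returns
-- none (outside Pre_)
def pvLoopB (word : List String) (i : Int) : Nat → Int → Int → List Char → List Char →
    Option (List Char × List Char)
  | fuel + 1, lo, hi, front, back =>
    if lo < hi then
      match pvReadC word lo i, pvReadC word hi i with
      | some a, some b =>
          if a = b then pvLoopB word i fuel (lo + 1) (hi - 1) (front ++ [a]) (back ++ [b])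
          else none
      | _, _ => none
    else if lo = hi then
      match pvReadC word lo i with
      | some c => some (front ++ [c], back)
      | none => none
    else some (front, back)
  | 0, lo, hi, front, back =>
    if lo = hi then
      match pvReadC word lo i with
      | some c => some (front ++ [c], back)
      | none => none
    else some (front, back)

def palin_col_alt (word : List String) (M : Int) (i : Int) (j : Int) : String :=
  match pvLoopB word i M.toNat j (j + M - 1) [] [] with
  | some (f, b) => String.ofList (f ++ b.reverse)
  | none => ""

-- ===== PRECONDITION & SPEC =====
-- Pre_ is exactly "A returns normally": every paired read A performs BEFORE the first
-- mismatching pair succeeds (inputs where A raises IndexError are excluded; inputs where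
-- A breaks early and returns '' while later rows are unreadable are INSIDE Pre_).
-- The bound M ≤ 2·len is IMPLIED for M ≥ 1 by the n = 0 read condition (two valid Python
-- indices differ by less than 2·len) and holds trivially for M ≤ 0; it is stated first
-- only so the condition evaluates without materialising range(M//2+1) for huge M.
def Pre_palin_col (word : List String) (M : Int) (i : Int) (j : Int) : Prop :=
  M ≤ 2 * (word.length : Int) ∧
  ∀ n ∈ PySem.List.pyRange 0 (PySem.Int.floordiv M 2 + 1) 1,
    (∀ k ∈ PySem.List.pyRange 0 n 1, pvReadC word (j + k) i = pvReadC word (j + M - 1 - k) i) →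
    ((pvReadC word (j + n) i).isSome ∧ (pvReadC word (j + M - 1 - n) i).isSome)
instance (word : List String) (M : Int) (i : Int) (j : Int) : Decidable (Pre_palin_col word M i j) := by unfold Pre_palin_col; infer_instance

def pvWitness_palin_col : List String × Int × Int × Int := (["ab", "cb", "ab"], 3, 1, 0)

def Spec_palin_col (word : List String) (M : Int) (i : Int) (j : Int) (out : String) : Prop := out = palin_col_alt word M i j
instance (word : List String) (M : Int) (i : Int) (j : Int) (out : String) : Decidable (Spec_palin_col word M i j out) := by unfold Spec_palin_col; infer_instance

-- ===== CLAIM =====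
def Claim_equal_palin_col : Prop := ∀ (word : List String) (M : Int) (i : Int) (j : Int), Dom_palin_col word M i j → Pre_palin_col word M i j → Spec_palin_col word M i j (palin_col word M i j)
-- ===== LEMMAS AND PROOFS =====

-- the column segment word[lo][i] … word[hi][i] (inclusive), defaulting failed reads
def pvSeg (word : List String) (i lo hi : Int) : List Char :=
  (List.range (hi + 1 - lo).toNat).map (fun (t : Nat) => (pvReadC word (lo + (t : Int)) i).getD 'A')

theorem pvSeg_decomp (word : List String) (i lo hi : Int) (h : lo < hi) :
    pvSeg word i lo hi
      = (pvReadC word lo i).getD 'A'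
          :: (pvSeg word i (lo + 1) (hi - 1) ++ [(pvReadC word hi i).getD 'A']) := by
  unfold pvSeg
  obtain ⟨m, hm⟩ : ∃ m : Nat, (hi + 1 - lo).toNat = m + 2 := ⟨(hi - lo - 1).toNat, by omega⟩
  have hm' : (hi - 1 + 1 - (lo + 1)).toNat = m := by omega
  rw [hm, hm', List.range_succ, List.map_append, List.range_succ_eq_map, List.map_cons,
    List.map_map]
  simp only [Nat.cast_zero, add_zero, List.cons_append]
  congr 1
  congr 1
  · apply List.map_congr_left
    intro t ht
    simp only [Function.comp]
    congr 2
    push_cast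
    ring
  · simp only [List.map_cons, List.map_nil]
    congr 3
    omega

theorem pvLoopB_success (word : List String) (i : Int) :
    ∀ (n : Nat) (lo hi : Int) (front back : List Char), (hi + 1 - lo).toNat ≤ n →
    (∀ r : Int, lo ≤ r → r ≤ hi → (pvReadC word r i).isSome) →
    (∀ t : Int, 0 ≤ t → lo + t ≤ hi - t → pvReadC word (lo + t) i = pvReadC word (hi - t) i) →
    ∃ F B, pvLoopB word i n lo hi front back = some (F, B) ∧
      F ++ B.reverse = (front ++ pvSeg word i lo hi) ++ back.reverse := by
  intro n
  induction n with
  | zero =>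
    intro lo hi front back hfuel hsome hpal
    have hlt : hi < lo := by omega
    refine ⟨front, back, ?_, ?_⟩
    · show (if lo = hi then _ else some (front, back)) = _
      rw [if_neg (by omega)]
    · have h0 : (hi + 1 - lo).toNat = 0 := by omega
      simp [pvSeg, h0]
  | succ n ih =>
    intro lo hi front back hfuel hsome hpal
    by_cases hlt : lo < hi
    · have ha := hsome lo (le_refl _) (by omega)
      have hb := hsome hi (by omega) (le_refl _)
      obtain ⟨a, ha'⟩ := Option.isSome_iff_exists.mp ha
      obtain ⟨b, hb'⟩ := Option.isSome_iff_exists.mp hb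
      have hab : a = b := by
        have := hpal 0 (le_refl _) (by omega)
        simp only [add_zero, sub_zero] at this
        rw [ha', hb'] at this
        exact Option.some_injective _ this
      subst hab
      obtain ⟨F, B, hFB, hcat⟩ := ih (lo + 1) (hi - 1) (front ++ [a]) (back ++ [a])
        (by omega)
        (fun r h1 h2 => hsome r (by omega) (by omega))
        (fun t ht hle => by
          have := hpal (t + 1) (by omega) (by omega)
          rw [show lo + (t + 1) = lo + 1 + t by ring, show hi - (t + 1) = hi - 1 - t by ring] at this
          exact this)
      refine ⟨F, B, ?_, ?_⟩
      · show (if lo < hi then _ else _) = _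
        rw [if_pos hlt]
        show (match pvReadC word lo i, pvReadC word hi i with
              | some a, some b => if a = b then
                  pvLoopB word i n (lo + 1) (hi - 1) (front ++ [a]) (back ++ [b]) else none
              | _, _ => none) = _
        rw [ha', hb']
        simpa using hFB
      · rw [hcat, pvSeg_decomp word i lo hi hlt, ha', hb']
        simp
    · by_cases heq : lo = hi
      · subst heq
        have hc := hsome lo (le_refl _) (le_refl _)
        obtain ⟨c, hc'⟩ := Option.isSome_iff_exists.mp hc
        refine ⟨front ++ [c], back, ?_, ?_⟩
        · show (if lo < lo then _ else _) = _
          rw [if_neg (by omega), if_pos rfl, hc']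
        · have h1 : (lo + 1 - lo).toNat = 1 := by omega
          rw [pvSeg, h1]
          simp [List.range_succ, hc']
      · refine ⟨front, back, ?_, ?_⟩
        · show (if lo < hi then _ else _) = _
          rw [if_neg hlt, if_neg heq]
        · have h0 : (hi + 1 - lo).toNat = 0 := by omega
          simp [pvSeg, h0]

theorem pvLoopB_none (word : List String) (i : Int) :
    ∀ (t₀ : Nat) (fuel : Nat) (lo hi : Int) (front back : List Char), t₀ < fuel →
    (∀ t : Nat, t < t₀ → pvReadC word (lo + (t : Int)) i = pvReadC word (hi - (t : Int)) i) →
    lo + (t₀ : Int) < hi - (t₀ : Int) →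
    (∃ a b, pvReadC word (lo + (t₀ : Int)) i = some a ∧
            pvReadC word (hi - (t₀ : Int)) i = some b ∧ a ≠ b) →
    pvLoopB word i fuel lo hi front back = none := by
  intro t0
  induction t0 with
  | zero =>
    intro fuel lo hi front back hfuel hmatch hlt hmm
    obtain ⟨f, rfl⟩ : ∃ f, fuel = f + 1 := ⟨fuel - 1, by omega⟩
    obtain ⟨a, b, ha, hb, hab⟩ := hmm
    simp only [Nat.cast_zero, add_zero, sub_zero] at ha hb hlt
    show (if lo < hi then _ else _) = _
    rw [if_pos hlt]
    show (match pvReadC word lo i, pvReadC word hi i with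
          | some a, some b => if a = b then
              pvLoopB word i f (lo + 1) (hi - 1) (front ++ [a]) (back ++ [b]) else none
          | _, _ => none) = _
    rw [ha, hb]
    simp [hab]
  | succ t ih =>
    intro fuel lo hi front back hfuel hmatch hlt hmm
    obtain ⟨f, rfl⟩ : ∃ f, fuel = f + 1 := ⟨fuel - 1, by omega⟩
    have hlt0 : lo < hi := by push_cast at hlt; omega
    have h0 := hmatch 0 (by omega)
    simp only [Nat.cast_zero, add_zero, sub_zero] at h0
    show (if lo < hi then _ else _) = _
    rw [if_pos hlt0]
    cases hread : pvReadC word lo i with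
    | none =>
      rfl
    | some a =>
      rw [hread] at h0
      rw [← h0]
      show (if a = a then pvLoopB word i f (lo + 1) (hi - 1) (front ++ [a]) (back ++ [a]) else none) = none
      rw [if_pos rfl]
      apply ih
      · omega
      · intro s hs
        have h := hmatch (s + 1) (by omega)
        push_cast at h
        rw [show lo + 1 + (s : Int) = lo + ((s : Int) + 1) by ring,
            show hi - 1 - (s : Int) = hi - ((s : Int) + 1) by ring]
        exact h
      · push_cast at hlt
        push_cast
        omega
      · obtain ⟨x, y, hx, hy, hxy⟩ := hmm
        push_cast at hx hy
        refine ⟨x, y, ?_, ?_, hxy⟩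
        · rw [show lo + 1 + ((t : Nat) : Int) = lo + ((t : Int) + 1) by ring]
          exact hx
        · rw [show hi - 1 - ((t : Nat) : Int) = hi - ((t : Int) + 1) by ring]
          exact hy

theorem foldl_build (g : Int → Option Char) (ns : List Int) (s : String) :
    ns.foldl (fun pal p => pal ++ (match g p with
                                   | some c => String.ofList [c]
                                   | none => "")) s
      = s ++ String.ofList (ns.filterMap g) := by
  induction ns generalizing s with
  | nil => simp
  | cons n ns ih =>
    simp only [List.foldl_cons, List.filterMap_cons, ih]
    cases hg : g n with
    | none => simp
    | some c =>
      simp only [String.append_assoc]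
      rw [← String.ofList_append, List.singleton_append]

theorem filterMap_all_some {α β : Type} (g : α → Option β) (d : β) (l : List α)
    (h : ∀ x ∈ l, (g x).isSome) :
    l.filterMap g = l.map (fun x => (g x).getD d) := by
  induction l with
  | nil => rfl
  | cons a l ih =>
    have ha := h a (by simp)
    cases hg : g a with
    | none => rw [hg] at ha; simp at ha
    | some c => simp [hg, ih (fun x hx => h x (by simp [hx]))]

-- Pre_'s second conjunct in Nat form: reads at pair n succeed if all earlier pairs match
theorem pre_somes (word : List String) (M i j : Int)
    (hPre : ∀ n ∈ PySem.List.pyRange 0 (PySem.Int.floordiv M 2 + 1) 1,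
      (∀ k ∈ PySem.List.pyRange 0 n 1, pvReadC word (j + k) i = pvReadC word (j + M - 1 - k) i) →
      ((pvReadC word (j + n) i).isSome ∧ (pvReadC word (j + M - 1 - n) i).isSome))
    (n : Nat) (hn : (n : Int) ≤ PySem.Int.floordiv M 2)
    (hmatch : ∀ k : Nat, k < n → pvReadC word (j + (k : Int)) i = pvReadC word (j + M - 1 - (k : Int)) i) :
    (pvReadC word (j + (n : Int)) i).isSome ∧ (pvReadC word (j + M - 1 - (n : Int)) i).isSome := by
  apply hPre (n : Int)
  · rw [PySem.List.mem_pyRange_one]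
    constructor
    · positivity
    · omega
  · intro k hk
    rw [PySem.List.mem_pyRange_one] at hk
    have hk0 : 0 ≤ k := hk.1
    have := hmatch k.toNat (by omega)
    rwa [show ((k.toNat : Nat) : Int) = k by omega] at this

theorem palin_col_spec : Claim_equal_palin_col := by
  intro word M i j _ hpre
  unfold Spec_palin_col palin_col palin_col_alt
  obtain ⟨-, hPre⟩ := hpre
  by_cases hMneg : M ≤ -1
  · -- M ≤ -1: A's check range and build range are both empty; B's loop never starts
    have hfd : PySem.Int.floordiv M 2 + 1 ≤ 0 := by
      rw [PySem.Int.floordiv_eq_ediv_of_pos (by norm_num)]; omega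
    rw [PySem.List.pyRange_one_eq_nil (by omega), PySem.List.pyRange_one_eq_nil (by omega : M ≤ 0)]
    have hfu : M.toNat = 0 := by omega
    rw [hfu]
    show (if _ then _ else _) = match (if j = j + M - 1 then _ else some ([], [])) with
      | some (f, b) => String.ofList (f ++ b.reverse) | none => ""
    rw [if_neg (show j ≠ j + M - 1 by omega)]
    simp
  by_cases hM0 : M = 0
  · -- M = 0: A compares word[j][i] with word[j-1][i] and returns '' either way
    subst hM0
    rw [show PySem.Int.floordiv 0 2 + 1 = 0 + 1 by decide, PySem.List.pyRange_one_singleton,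
      PySem.List.pyRange_one_eq_nil (by omega)]
    show (if _ then _ else _) = match (if j = j + 0 - 1 then _ else some ([], [])) with
      | some (f, b) => String.ofList (f ++ b.reverse) | none => ""
    rw [if_neg (show j ≠ j + 0 - 1 by omega)]
    split <;> simp
  -- 1 ≤ M
  have hM : 1 ≤ M := by omega
  have hfd : PySem.Int.floordiv M 2 = M / 2 := PySem.Int.floordiv_eq_ediv_of_pos (by norm_num)
  by_cases hall : ∀ n : Nat, (n : Int) ≤ PySem.Int.floordiv M 2 →
      pvReadC word (j + (n : Int)) i = pvReadC word (j + M - 1 - (n : Int)) i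
  · -- every pair matches: A builds the column; B's loop completes
    have hsomepair : ∀ n : Nat, (n : Int) ≤ PySem.Int.floordiv M 2 →
        (pvReadC word (j + (n : Int)) i).isSome ∧ (pvReadC word (j + M - 1 - (n : Int)) i).isSome :=
      fun n hn => pre_somes word M i j hPre n hn (fun k hk => hall k (by omega))
    have hsomeAll : ∀ p : Nat, (p : Int) < M → (pvReadC word (j + (p : Int)) i).isSome := by
      intro p hp
      by_cases hple : (p : Int) ≤ PySem.Int.floordiv M 2
      · exact (hsomepair p hple).1
      · rw [hfd] at hple
        set q : Nat := (M - 1 - (p : Int)).toNat with hqdef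
        have hq : (q : Int) = M - 1 - p := by omega
        have h2 := (hsomepair q (by rw [hfd]; omega)).2
        rwa [show j + M - 1 - (q : Int) = j + (p : Int) by rw [hq]; ring] at h2
    have htest : ((PySem.List.pyRange 0 (PySem.Int.floordiv M 2 + 1) 1).all
        (fun n => pvReadC word (j + n) i == pvReadC word (j + M - 1 - n) i)) = true := by
      rw [List.all_eq_true]
      intro x hx
      rw [PySem.List.mem_pyRange_one] at hx
      have h := hall x.toNat (by omega)
      rw [show ((x.toNat : Nat) : Int) = x by omega] at h
      simp [h]
    rw [htest]
    simp only [if_pos]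
    rw [foldl_build]
    have hcol : (PySem.List.pyRange 0 M 1).filterMap (fun p => pvReadC word (j + p) i)
        = (List.range M.toNat).map (fun (t : Nat) => (pvReadC word (j + (t : Int)) i).getD 'A') := by
      rw [PySem.List.pyRange_one]
      simp only [sub_zero, List.filterMap_map]
      rw [filterMap_all_some _ 'A' _
        (by
          intro x hx
          have hx' := List.mem_range.mp hx
          have := hsomeAll x (by omega)
          simpa [Function.comp] using this)]
      apply List.map_congr_left
      intro x hx
      simp [Function.comp]
    rw [hcol]
    obtain ⟨F, B, hFB, hcat⟩ := pvLoopB_success word i M.toNat j (j + M - 1) [] []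
      (by omega)
      (by
        intro r h1 h2
        have := hsomeAll (r - j).toNat (by omega)
        rwa [show j + (((r - j).toNat : Nat) : Int) = r by omega] at this)
      (by
        intro t ht hle
        have h := hall t.toNat (by rw [hfd]; omega)
        rw [show ((t.toNat : Nat) : Int) = t by omega] at h
        exact h)
    rw [hFB]
    have hseg : pvSeg word i j (j + M - 1)
        = (List.range M.toNat).map (fun (t : Nat) => (pvReadC word (j + (t : Int)) i).getD 'A') := by
      unfold pvSeg
      rw [show (j + M - 1 + 1 - j).toNat = M.toNat from by omega]
    show "" ++ String.ofList ((List.range M.toNat).map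
        (fun (t : Nat) => (pvReadC word (j + (t : Int)) i).getD 'A')) = String.ofList (F ++ B.reverse)
    rw [hcat, hseg]
    simp
  · -- some pair mismatches: both sides return ''
    have hex : ∃ n : Nat, (n : Int) ≤ PySem.Int.floordiv M 2 ∧
        pvReadC word (j + (n : Int)) i ≠ pvReadC word (j + M - 1 - (n : Int)) i := by
      push_neg at hall; exact hall
    obtain ⟨n0, hn0, hminP⟩ : ∃ n0 : Nat, ((n0 : Int) ≤ PySem.Int.floordiv M 2 ∧
        pvReadC word (j + (n0 : Int)) i ≠ pvReadC word (j + M - 1 - (n0 : Int)) i) ∧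
        ∀ k : Nat, k < n0 → ¬((k : Int) ≤ PySem.Int.floordiv M 2 ∧
          pvReadC word (j + (k : Int)) i ≠ pvReadC word (j + M - 1 - (k : Int)) i) :=
      ⟨Nat.find hex, Nat.find_spec hex, fun k hk => Nat.find_min hex hk⟩
    have hmin : ∀ k : Nat, k < n0 →
        pvReadC word (j + (k : Int)) i = pvReadC word (j + M - 1 - (k : Int)) i := by
      intro k hk
      by_contra hne
      exact hminP k hk ⟨by have := hn0.1; omega, hne⟩
    have hsome_le : ∀ k : Nat, k ≤ n0 →
        (pvReadC word (j + (k : Int)) i).isSome ∧ (pvReadC word (j + M - 1 - (k : Int)) i).isSome :=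
      fun k hk => pre_somes word M i j hPre k (by have := hn0.1; omega)
        (fun k' hk' => hmin k' (by omega))
    obtain ⟨a, ha⟩ := Option.isSome_iff_exists.mp (hsome_le n0 le_rfl).1
    obtain ⟨b, hb⟩ := Option.isSome_iff_exists.mp (hsome_le n0 le_rfl).2
    have hne : a ≠ b := fun h => hn0.2 (by rw [ha, hb, h])
    have hpos : (n0 : Int) + (n0 : Int) < M - 1 := by
      by_contra hge
      push_neg at hge
      rcases eq_or_lt_of_le hge with heq | hlt2
      · -- M - 1 = 2·n0: the pair is the middle element compared with itself
        apply hn0.2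
        rw [show j + (n0 : Int) = j + M - 1 - (n0 : Int) by omega]
      · -- M = 2·n0: the pair is the swap of the pair n0 - 1, which matched
        have hfd' := hn0.1
        rw [hfd] at hfd'
        have hM2 : (n0 : Int) + (n0 : Int) = M := by omega
        have hn01 : 1 ≤ n0 := by omega
        have h := hmin (n0 - 1) (by omega)
        rw [show (((n0 - 1 : Nat)) : Int) = (n0 : Int) - 1 by omega] at h
        apply hn0.2
        rw [show j + (n0 : Int) = j + M - 1 - ((n0 : Int) - 1) by omega,
            show j + M - 1 - (n0 : Int) = j + ((n0 : Int) - 1) by omega]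
        exact h.symm
    have htest : ((PySem.List.pyRange 0 (PySem.Int.floordiv M 2 + 1) 1).all
        (fun n => pvReadC word (j + n) i == pvReadC word (j + M - 1 - n) i)) = false := by
      rw [List.all_eq_false]
      refine ⟨(n0 : Int), ?_, ?_⟩
      · rw [PySem.List.mem_pyRange_one]
        constructor
        · positivity
        · have := hn0.1; omega
      · simp [ha, hb, hne]
    rw [htest]
    rw [pvLoopB_none word i n0 M.toNat j (j + M - 1) [] []
      (by omega)
      (fun t ht => hmin t ht)
      (by omega)
      ⟨a, b, ha, hb, hne⟩]
    simp
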